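-- pv_equiv track=rewrite | github.com/taylorott/Advent_of_Code | src/Year_2025/Day12/Solution.py | deserialize_shape
-- ===== SOURCE A (Python) =====
-- def deserialize_shape(shape):
--     grid = []
--
--     char_list = ['.','#']
--
--     for i in range(3):
--         row = []
--         for j in range(3):
--             b = (shape >> (3*i+j))&1
--             row.append(char_list[b])
--
--         grid.append(row)
--
--     return grid
-- ===== SOURCE B (Python) =====
-- def deserialize_shape(shape):
--     bits = format(shape % 512, '09b')[::-1]
--     return [['#' if c == '1' else '.' for c in bits[k:k + 3]] for k in (0, 3, 6)]
-- ===== Notes on version B (the rewrite author's own statement) =====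
-- stated objective: idiomatic
-- what changed: B replaces the nested 3x3 loop of nine per-cell shift-and-mask operations by one binary-string conversion of the low nine bits (format(...,'09b')), reversed, translated to '.'/'#', and chunked into three rows.
import Mathlib
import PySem

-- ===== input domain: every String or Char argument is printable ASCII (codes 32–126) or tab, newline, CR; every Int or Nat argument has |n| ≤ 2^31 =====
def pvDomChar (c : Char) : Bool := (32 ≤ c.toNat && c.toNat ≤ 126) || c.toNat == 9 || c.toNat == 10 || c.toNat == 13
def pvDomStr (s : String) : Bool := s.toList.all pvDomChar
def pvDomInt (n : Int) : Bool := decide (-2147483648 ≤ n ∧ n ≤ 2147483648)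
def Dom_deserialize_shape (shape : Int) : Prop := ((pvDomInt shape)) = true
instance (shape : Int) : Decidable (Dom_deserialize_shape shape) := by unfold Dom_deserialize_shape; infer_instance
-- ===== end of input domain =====

-- B replaces the nine per-cell shift-and-mask loop iterations by one binary-string
-- conversion of the low nine bits that is reversed, translated to '.'/'#' and chunked into rows (objective: idiomatic).

-- ===== PORT A =====
def deserialize_shape (shape : Int) : List (List String) :=
  let char_list := [".", "#"]
  (PySem.List.pyRange 0 3 1).foldl (fun grid i =>
    let row := (PySem.List.pyRange 0 3 1).foldl (fun row j =>
      let b := PySem.Int.band (shape >>> (3 * i + j).toNat) 1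
      row ++ [PySem.List.pyGetD char_list b ""]) ([] : List String)
    grid ++ [row]) ([] : List (List String))

-- ===== PORT B =====
-- format(m, '09b') for 0 ≤ m < 512 is the plain binary digits of m left-padded with '0' to
-- width 9 (no sign); ported exactly as toBinChars plus the zero padding.
def deserialize_shape_alt (shape : Int) : List (List String) :=
  let m := PySem.Int.mod shape 512
  let digits := PySem.Int.toBinChars m
  let bits := (List.replicate (9 - digits.length) '0' ++ digits).reverse
  ([0, 3, 6] : List Int).map (fun k =>
    (PySem.List.slice bits (some k) (some (k + 3))).map (fun c => if c = '1' then "#" else "."))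

-- ===== PRECONDITION & SPEC =====
def Spec_deserialize_shape (shape : Int) (out : List (List String)) : Prop := out = deserialize_shape_alt shape
instance (shape : Int) (out : List (List String)) : Decidable (Spec_deserialize_shape shape out) := by unfold Spec_deserialize_shape; infer_instance

-- ===== CLAIM (what is proved, stated in full; the proofs are below) =====
def Claim_equal_deserialize_shape : Prop := ∀ (shape : Int), Dom_deserialize_shape shape → Spec_deserialize_shape shape (deserialize_shape shape)

-- ===== LEMMAS AND PROOFS =====

-- The string A appends for one cell (bit index k, the value 3*i+j of A's loop).
def pvCell (t : Int) (k : Int) : String :=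
  PySem.List.pyGetD [".", "#"] (PySem.Int.band (t >>> k.toNat) 1) ""

-- A's unfolding: the grid is the nine cells in order.
theorem pv_A_cells (t : Int) :
    deserialize_shape t =
      [[pvCell t 0, pvCell t 1, pvCell t 2],
       [pvCell t 3, pvCell t 4, pvCell t 5],
       [pvCell t 6, pvCell t 7, pvCell t 8]] := by
  simp only [deserialize_shape, pvCell,
    show PySem.List.pyRange 0 3 1 = [0, 1, 2] from by decide, List.foldl]
  norm_num
  have h0 : t >>> (0 : Int) = t := by
    rw [show (0 : Int) = ((0 : Nat) : Int) from rfl, Int.shiftRight_natCast_right,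
      Int.shiftRight_eq_div_pow]
    norm_num
  simp only [← Int.shiftRight_natCast_right]
  norm_num [h0]

-- Each cell (bit index 0 ≤ k < 9) only depends on shape modulo 512.
theorem pv_cell_mod (s k : Int) (hk0 : 0 ≤ k) (hk9 : k < 9) :
    pvCell s k = pvCell (PySem.Int.mod s 512) k := by
  have hb : PySem.Int.band (s >>> k.toNat) 1 =
      PySem.Int.band ((PySem.Int.mod s 512) >>> k.toNat) 1 := by
    rw [PySem.Int.band_one, PySem.Int.band_one, Int.shiftRight_eq_div_pow,
      Int.shiftRight_eq_div_pow, PySem.Int.mod_eq_emod_of_pos (b := 2) (by norm_num),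
      PySem.Int.mod_eq_emod_of_pos (b := 2) (by norm_num),
      PySem.Int.mod_eq_emod_of_pos (b := 512) (by norm_num)]
    interval_cases k <;>
      (try simp only [show ((2:Int).toNat) = 2 from rfl, show ((3:Int).toNat) = 3 from rfl,
        show ((4:Int).toNat) = 4 from rfl, show ((5:Int).toNat) = 5 from rfl,
        show ((6:Int).toNat) = 6 from rfl, show ((7:Int).toNat) = 7 from rfl,
        show ((8:Int).toNat) = 8 from rfl]) <;> norm_num <;> omega
  simp only [pvCell, hb]

-- A's result only depends on shape modulo 512.
theorem pv_A_mod (s : Int) : deserialize_shape s = deserialize_shape (PySem.Int.mod s 512) := by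
  rw [pv_A_cells, pv_A_cells,
    pv_cell_mod s 0 (by norm_num) (by norm_num), pv_cell_mod s 1 (by norm_num) (by norm_num),
    pv_cell_mod s 2 (by norm_num) (by norm_num), pv_cell_mod s 3 (by norm_num) (by norm_num),
    pv_cell_mod s 4 (by norm_num) (by norm_num), pv_cell_mod s 5 (by norm_num) (by norm_num),
    pv_cell_mod s 6 (by norm_num) (by norm_num), pv_cell_mod s 7 (by norm_num) (by norm_num),
    pv_cell_mod s 8 (by norm_num) (by norm_num)]

-- B's result only depends on shape modulo 512 (its first step is that reduction).
theorem pv_B_mod (s : Int) :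
    deserialize_shape_alt s = deserialize_shape_alt (PySem.Int.mod s 512) := by
  simp only [deserialize_shape_alt]
  rw [show PySem.Int.mod (PySem.Int.mod s 512) 512 = PySem.Int.mod s 512 by
    rw [PySem.Int.mod_eq_emod_of_pos (b := 512) (by norm_num),
      PySem.Int.mod_eq_emod_of_pos (b := 512) (by norm_num)]
    omega]

-- A = B on all 512 residues, checked by exhaustive kernel evaluation.
set_option maxHeartbeats 4000000 in
set_option maxRecDepth 10000 in
theorem pv_all_residues : ∀ n : Fin 512, deserialize_shape (n : Int) = deserialize_shape_alt (n : Int) := by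
  decide

-- ===== VERDICT (by name: the statement is the Claim_ definition above) =====
theorem deserialize_shape_spec : Claim_equal_deserialize_shape := by
  intro shape _
  show deserialize_shape shape = deserialize_shape_alt shape
  have h0 : 0 ≤ PySem.Int.mod shape 512 := PySem.Int.mod_nonneg shape (by norm_num)
  have h1 : PySem.Int.mod shape 512 < 512 := PySem.Int.mod_lt shape (by norm_num)
  have hcast : ((PySem.Int.mod shape 512).toNat : Int) = PySem.Int.mod shape 512 := Int.toNat_of_nonneg h0
  have := pv_all_residues ⟨(PySem.Int.mod shape 512).toNat, by omega⟩
  rw [hcast] at this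
  rw [pv_A_mod, pv_B_mod, this]
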